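-- pv_equiv track=rewrite | github.com/r3m4k/Job-Data_from_carrige | profile.py | get_end_points
-- ===== SOURCE A (Python) =====
-- def get_end_points(table):
--     result = []
--     for column in table:
--         for row in range(len(column) - 1, 1, -1):
--             if column[row] != column[row - 1]:
--                 result.append(row + 1)
--                 break
--
--     return result
-- ===== SOURCE B (Python) =====
-- def get_end_points(table):
--     result = []
--     for column in table:
--         diffs = [r for r in range(2, len(column)) if column[r] != column[r - 1]]
--         if diffs:
--             result.append(diffs[-1] + 1)
--     return result
-- ===== Notes on version B (the rewrite author's own statement) =====
-- stated objective: simpler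
-- what changed: Replaces A's reverse scan with early break by a forward filter of all difference indices followed by selecting the last one.
import Mathlib
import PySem

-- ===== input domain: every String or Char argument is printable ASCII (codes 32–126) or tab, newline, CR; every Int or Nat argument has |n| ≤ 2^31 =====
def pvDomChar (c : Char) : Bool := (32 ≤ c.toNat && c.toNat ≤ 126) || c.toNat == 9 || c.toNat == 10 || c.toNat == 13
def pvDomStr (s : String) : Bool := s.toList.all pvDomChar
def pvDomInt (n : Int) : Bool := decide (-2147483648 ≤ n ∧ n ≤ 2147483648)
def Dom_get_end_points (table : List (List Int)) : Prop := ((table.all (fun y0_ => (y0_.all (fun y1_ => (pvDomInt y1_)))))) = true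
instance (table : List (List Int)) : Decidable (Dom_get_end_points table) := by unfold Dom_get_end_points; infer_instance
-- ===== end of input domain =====

-- B replaces A's reverse scan with early break by a forward filter of all
-- difference indices followed by selecting the last one (objective: simpler).


-- ===== PORT A =====
-- inner loop of A: scan rows (the countdown range) and break at the first difference
def pvLoopA (column : List Int) (result : List Int) : List Int → List Int
  | [] => result
  | r :: rest =>
    if PySem.List.pyGetD column r 0 ≠ PySem.List.pyGetD column (r - 1) 0 then
      result ++ [r + 1]
    else
      pvLoopA column result rest

def get_end_points (table : List (List Int)) : List Int :=
  table.foldl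
    (fun result column =>
      pvLoopA column result (PySem.List.pyRange ((column.length : Int) - 1) 1 (-1)))
    []

-- ===== PORT B =====
def pvDiffs (column : List Int) : List Int :=
  (PySem.List.pyRange 2 (column.length : Int) 1).filter
    (fun r => PySem.List.pyGetD column r 0 ≠ PySem.List.pyGetD column (r - 1) 0)

def get_end_points_alt (table : List (List Int)) : List Int :=
  table.foldl
    (fun result column =>
      match (pvDiffs column).getLast? with
      | some d => result ++ [d + 1]
      | none => result)
    []

-- ===== PRECONDITION & SPEC =====
def Spec_get_end_points (table : List (List Int)) (out : List Int) : Prop := out = get_end_points_alt table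
instance (table : List (List Int)) (out : List Int) : Decidable (Spec_get_end_points table out) := by unfold Spec_get_end_points; infer_instance

-- ===== CLAIM (what is proved, stated in full; the proofs are below) =====
def Claim_equal_get_end_points : Prop := ∀ (table : List (List Int)), Dom_get_end_points table → Spec_get_end_points table (get_end_points table)

-- ===== LEMMAS AND PROOFS =====

-- A's break-loop is find?
theorem pvLoopA_eq_find (column result : List Int) (rows : List Int) :
    pvLoopA column result rows =
      match rows.find?
          (fun r => decide (PySem.List.pyGetD column r 0 ≠ PySem.List.pyGetD column (r - 1) 0)) with
      | some r => result ++ [r + 1]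
      | none => result := by
  induction rows with
  | nil => rfl
  | cons r rest ih =>
    by_cases h : PySem.List.pyGetD column r 0 ≠ PySem.List.pyGetD column (r - 1) 0 <;>
      simp [pvLoopA, h, ih]

-- first match of a reversed list = last match of the list
theorem find?_reverse_eq_getLast?_filter {α : Type} (p : α → Bool) (l : List α) :
    l.reverse.find? p = (l.filter p).getLast? := by
  induction l with
  | nil => rfl
  | cons a l ih =>
    rw [List.reverse_cons, List.find?_append, ih]
    by_cases h : p a <;>
      cases hl : (l.filter p).getLast? <;>
        simp [h, hl, List.getLast?_cons]

theorem pvStep_eq (result : List Int) (column : List Int) :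
    pvLoopA column result (PySem.List.pyRange ((column.length : Int) - 1) 1 (-1)) =
      match (pvDiffs column).getLast? with
      | some d => result ++ [d + 1]
      | none => result := by
  rw [pvLoopA_eq_find, PySem.List.pyRange_neg_one_eq_reverse]
  have : (1 : Int) + 1 = 2 := by norm_num
  rw [this]
  have : ((column.length : Int) - 1) + 1 = (column.length : Int) := by ring
  rw [this, find?_reverse_eq_getLast?_filter]
  rfl

-- ===== VERDICT (by name: the statement is the Claim_ definition above) =====
theorem get_end_points_spec : Claim_equal_get_end_points := by
  intro table _
  show get_end_points table = get_end_points_alt table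
  unfold get_end_points get_end_points_alt
  apply PySem.List.foldl_congr_mem
  intro result column _
  exact pvStep_eq result column
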